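-- pv_equiv track=rewrite | github.com/aliyusufabass-tech/project_kisinia | core/serializers.py | pick_auto_media_path
-- ===== SOURCE A (Python) =====
-- def pick_auto_media_path(options, seed):
--     if not options:
--         return None
--     text = str(seed or '')
--     value = 0
--     for index, char in enumerate(text):
--         value += (index + 1) * ord(char)
--     return options[value % len(options)]
-- ===== SOURCE B (Python) =====
-- def pick_auto_media_path(options, seed):
--     if not options:
--         return None
--     text = seed or ''
--     remaining = sum(ord(c) for c in text)
--     value = 0
--     for c in text:
--         value += remaining
--         remaining -= ord(c)
--     return options[value % len(options)]
-- ===== Notes on version B (the rewrite author's own statement) =====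
-- stated objective: alternative
-- what changed: Replaces the single indexed multiply-accumulate with two staged passes: first a plain sum of all char codes, then a forward pass that adds the current suffix total and subtracts each code, so value = sum of suffix sums = sum((i+1)*ord(c_i)).
import Mathlib
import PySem

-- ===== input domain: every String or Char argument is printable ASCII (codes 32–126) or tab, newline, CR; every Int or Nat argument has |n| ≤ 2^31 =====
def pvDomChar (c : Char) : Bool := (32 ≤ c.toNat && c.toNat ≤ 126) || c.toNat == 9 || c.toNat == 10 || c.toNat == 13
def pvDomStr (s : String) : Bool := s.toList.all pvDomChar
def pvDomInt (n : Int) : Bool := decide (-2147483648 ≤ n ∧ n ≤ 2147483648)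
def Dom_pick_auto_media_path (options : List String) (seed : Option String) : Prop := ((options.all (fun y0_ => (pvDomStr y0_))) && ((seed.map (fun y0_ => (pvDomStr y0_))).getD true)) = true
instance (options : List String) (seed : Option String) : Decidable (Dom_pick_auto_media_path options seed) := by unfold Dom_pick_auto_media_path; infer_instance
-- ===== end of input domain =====

-- B computes the weighted hash in two staged passes (total of char codes, then a
-- forward pass adding the running suffix total) instead of A's indexed
-- multiply-accumulate (objective: alternative decomposition, same cost).

-- ===== PORT A =====
def pick_auto_media_path (options : List String) (seed : Option String) : Option String :=
  if options = [] then none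
  else
    let text : String := match seed with
      | none => ""
      | some s => if s = "" then "" else s
    let value : Int :=
      (PySem.List.enumerate text.toList).foldl
        (fun v ic => v + (ic.1 + 1) * (ic.2.toNat : Int)) 0
    PySem.List.pyGet? options (PySem.Int.mod value (options.length : Int))

-- ===== PORT B =====
def pvStep : Int × Int → Char → Int × Int
  | (value, remaining), c => (value + remaining, remaining - (c.toNat : Int))

def pick_auto_media_path_alt (options : List String) (seed : Option String) : Option String :=
  match options with
  | [] => none
  | _ :: _ =>
    let chars : List Char := (match seed with
      | none => ""
      | some s => if s = "" then "" else s).toList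
    let remaining : Int := chars.foldl (fun a c => a + (c.toNat : Int)) 0
    let out := chars.foldl pvStep (0, remaining)
    PySem.List.pyGet? options (PySem.Int.mod out.1 (options.length : Int))

-- ===== PRECONDITION & SPEC =====
def Spec_pick_auto_media_path (options : List String) (seed : Option String) (out : Option String) : Prop := out = pick_auto_media_path_alt options seed
instance (options : List String) (seed : Option String) (out : Option String) : Decidable (Spec_pick_auto_media_path options seed out) := by unfold Spec_pick_auto_media_path; infer_instance

-- ===== CLAIM (what is proved, stated in full; the proofs are below) =====
def Claim_equal_pick_auto_media_path : Prop := ∀ (options : List String) (seed : Option String), Dom_pick_auto_media_path options seed → Spec_pick_auto_media_path options seed (pick_auto_media_path options seed)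

-- ===== LEMMAS AND PROOFS =====

/-- Σ over the list of (s + i + 1) * ord(cᵢ), with s the starting enumerate index. -/
def pvWsum : List Char → Int → Int
  | [], _ => 0
  | c :: t, s => (s + 1) * (c.toNat : Int) + pvWsum t (s + 1)

/-- Σ of char codes. -/
def pvSord : List Char → Int
  | [] => 0
  | c :: t => (c.toNat : Int) + pvSord t

/-- Σ of ord(cᵢ) · (length of the rest after cᵢ). -/
def pvRest : List Char → Int
  | [] => 0
  | c :: t => (c.toNat : Int) * t.length + pvRest t

lemma pvFoldA (l : List Char) (s v : Int) :
    (PySem.List.enumerate l s).foldl (fun v ic => v + (ic.1 + 1) * (ic.2.toNat : Int)) v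
      = v + pvWsum l s := by
  induction l generalizing s v with
  | nil => simp [PySem.List.enumerate_nil, pvWsum]
  | cons c t ih =>
      simp [PySem.List.enumerate_cons, pvWsum, ih (s + 1)]
      ring

lemma pvSordFold (l : List Char) (a : Int) :
    l.foldl (fun a c => a + (c.toNat : Int)) a = a + pvSord l := by
  induction l generalizing a with
  | nil => simp [pvSord]
  | cons c t ih => simp [ih, pvSord]; ring

lemma pvFoldB (l : List Char) (v r : Int) :
    l.foldl pvStep (v, r) = (v + r * l.length - pvRest l, r - pvSord l) := by
  induction l generalizing v r with
  | nil => simp [pvRest, pvSord]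
  | cons c t ih =>
      simp only [List.foldl_cons, pvStep, ih, pvRest, pvSord, List.length_cons]
      refine Prod.ext ?_ ?_ <;> push_cast <;> ring

lemma pvWsum_closed (l : List Char) (s : Int) :
    pvWsum l s = s * pvSord l + (pvSord l * l.length - pvRest l) := by
  induction l generalizing s with
  | nil => simp [pvWsum, pvSord, pvRest]
  | cons c t ih =>
      simp only [pvWsum, pvSord, pvRest, List.length_cons, ih (s + 1)]
      push_cast; ring

-- ===== VERDICT (by name: the statement is the Claim_ definition above) =====
theorem pick_auto_media_path_spec : Claim_equal_pick_auto_media_path := by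
  intro options seed _
  unfold Spec_pick_auto_media_path pick_auto_media_path pick_auto_media_path_alt
  cases options with
  | nil => simp
  | cons o os =>
      simp only [List.cons_ne_nil, if_neg, not_false_eq_true]
      rw [pvFoldA _ 0 0, pvSordFold _ 0, pvFoldB]
      rw [pvWsum_closed]
      ring_nf
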